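-- pv_equiv track=rewrite | github.com/HujiGabarel/soccer_fields | height_initial.py | find_differnces_in_neightboring_nodes
-- ===== SOURCE A (Python) =====
-- def find_differnces_in_neightboring_nodes(dem_data, rows, cols):
--     cells = []
--     for i in range(rows - 1):
--         row = []
--         for j in range(cols - 1):
--             row.append(min(2, max(abs(dem_data[i][j + 1] - dem_data[i][j]),
--                                     abs(dem_data[i + 1][j + 1] - dem_data[i + 1][j]),
--                                     abs(dem_data[i + 1][j] - dem_data[i][j]),
--                                     abs(dem_data[i + 1][j + 1] - dem_data[i][j + 1]))))
--         cells.append(row)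
--     return cells
-- ===== SOURCE B (Python) =====
-- def find_differnces_in_neightboring_nodes(dem_data, rows, cols):
--     # Two-phase: precompute horizontal and vertical edge-difference tables, then combine.
--     if rows <= 1:
--         return []
--     if cols <= 1:
--         return [[] for _ in range(rows - 1)]
--     H = [[abs(r[j + 1] - r[j]) for j in range(cols - 1)] for r in dem_data[:rows]]
--     V = [[abs(dem_data[i + 1][j] - dem_data[i][j]) for j in range(cols)]
--          for i in range(rows - 1)]
--     return [[min(2, max(H[i][j], H[i + 1][j], V[i][j], V[i][j + 1]))
--              for j in range(cols - 1)] for i in range(rows - 1)]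
-- ===== Notes on version B (the rewrite author's own statement) =====
-- stated objective: alternative
-- what changed: B splits the work into two phases: it first builds horizontal and vertical edge-difference tables (each grid edge computed once instead of twice), then combines four table lookups per cell, instead of A's single nested loop recomputing all four absolute differences per cell.
import Mathlib
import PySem

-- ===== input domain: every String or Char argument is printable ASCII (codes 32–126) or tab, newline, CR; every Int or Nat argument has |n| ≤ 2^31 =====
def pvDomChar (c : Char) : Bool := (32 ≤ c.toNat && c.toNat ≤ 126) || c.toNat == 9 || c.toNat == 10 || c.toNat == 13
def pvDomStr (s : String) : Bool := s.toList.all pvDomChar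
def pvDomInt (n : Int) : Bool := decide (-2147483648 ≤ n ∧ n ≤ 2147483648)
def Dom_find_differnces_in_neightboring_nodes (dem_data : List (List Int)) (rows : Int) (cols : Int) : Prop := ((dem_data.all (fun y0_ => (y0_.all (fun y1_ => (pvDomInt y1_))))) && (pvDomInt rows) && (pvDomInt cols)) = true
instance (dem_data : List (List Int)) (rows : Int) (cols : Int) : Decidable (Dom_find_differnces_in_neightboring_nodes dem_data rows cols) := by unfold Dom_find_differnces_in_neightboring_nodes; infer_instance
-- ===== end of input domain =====

-- B re-decomposes A's single nested loop into two phases (horizontal/vertical edge-difference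
-- tables, then a combining pass); same cost class, each edge difference computed once.

-- ===== PORT A =====
-- dem_data[i][j] (both indices nonnegative, in range under Pre_)
def pvGet2 (dem : List (List Int)) (i j : Int) : Int :=
  PySem.List.pyGetD (PySem.List.pyGetD dem i []) j 0

def find_differnces_in_neightboring_nodes (dem_data : List (List Int)) (rows : Int) (cols : Int) : List (List Int) :=
  (PySem.List.pyRange 0 (rows - 1) 1).foldl (fun cells i =>
    cells ++ [ (PySem.List.pyRange 0 (cols - 1) 1).foldl (fun row j =>
      row ++ [ min 2 (max (max (max
        |pvGet2 dem_data i (j + 1) - pvGet2 dem_data i j|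
        |pvGet2 dem_data (i + 1) (j + 1) - pvGet2 dem_data (i + 1) j|)
        |pvGet2 dem_data (i + 1) j - pvGet2 dem_data i j|)
        |pvGet2 dem_data (i + 1) (j + 1) - pvGet2 dem_data i (j + 1)|) ]) [] ]) []

-- ===== PORT B =====
-- r[j] for a single row r
def pvGet1 (r : List Int) (j : Int) : Int := PySem.List.pyGetD r j 0

def find_differnces_in_neightboring_nodes_alt (dem_data : List (List Int)) (rows : Int) (cols : Int) : List (List Int) :=
  if rows ≤ 1 then []
  else if cols ≤ 1 then (PySem.List.pyRange 0 (rows - 1) 1).map (fun _ => [])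
  else
    let H := (PySem.List.slice dem_data none (some rows)).map (fun r =>
      (PySem.List.pyRange 0 (cols - 1) 1).map (fun j => |pvGet1 r (j + 1) - pvGet1 r j|))
    let V := (PySem.List.pyRange 0 (rows - 1) 1).map (fun i =>
      (PySem.List.pyRange 0 cols 1).map (fun j => |pvGet2 dem_data (i + 1) j - pvGet2 dem_data i j|))
    (PySem.List.pyRange 0 (rows - 1) 1).map (fun i =>
      (PySem.List.pyRange 0 (cols - 1) 1).map (fun j =>
        min 2 (max (max (max (pvGet2 H i j) (pvGet2 H (i + 1) j)) (pvGet2 V i j)) (pvGet2 V i (j + 1)))))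

-- ===== PRECONDITION & SPEC =====
-- Pre_ = exactly the inputs on which A returns (raises no IndexError): either a degenerate
-- grid request (rows ≤ 1 or cols ≤ 1, where A reads nothing), or the first `rows` rows exist
-- and each of them has at least `cols` entries.
def Pre_find_differnces_in_neightboring_nodes (dem_data : List (List Int)) (rows : Int) (cols : Int) : Prop :=
  rows ≤ 1 ∨ cols ≤ 1 ∨
    (rows ≤ (dem_data.length : Int) ∧ (dem_data.take rows.toNat).all (fun r => cols ≤ (r.length : Int)))
instance (dem_data : List (List Int)) (rows : Int) (cols : Int) : Decidable (Pre_find_differnces_in_neightboring_nodes dem_data rows cols) := by unfold Pre_find_differnces_in_neightboring_nodes; infer_instance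

def pvWitness_find_differnces_in_neightboring_nodes : List (List Int) × Int × Int :=
  ([[1, 3, 0], [0, 0, 5], [7, 0, 0]], 3, 3)

def Spec_find_differnces_in_neightboring_nodes (dem_data : List (List Int)) (rows : Int) (cols : Int) (out : List (List Int)) : Prop := out = find_differnces_in_neightboring_nodes_alt dem_data rows cols
instance (dem_data : List (List Int)) (rows : Int) (cols : Int) (out : List (List Int)) : Decidable (Spec_find_differnces_in_neightboring_nodes dem_data rows cols out) := by unfold Spec_find_differnces_in_neightboring_nodes; infer_instance

-- ===== CLAIM (what is proved, stated in full; the proofs are below) =====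
def Claim_equal_find_differnces_in_neightboring_nodes : Prop := ∀ (dem_data : List (List Int)) (rows : Int) (cols : Int), Dom_find_differnces_in_neightboring_nodes dem_data rows cols → Pre_find_differnces_in_neightboring_nodes dem_data rows cols → Spec_find_differnces_in_neightboring_nodes dem_data rows cols (find_differnces_in_neightboring_nodes dem_data rows cols)

-- ===== LEMMAS AND PROOFS =====

-- Row lookup: under the bounds, dem_data[i] is the literal getElem row.
lemma pvGet2_row (dem : List (List Int)) (i : Int) (hi : 0 ≤ i) (hilen : i < (dem.length : Int)) (j : Int) :
    pvGet2 dem i j = pvGet1 (dem[i.toNat]'(by omega)) j := by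
  unfold pvGet2 pvGet1
  rw [PySem.List.pyGetD_eq_getElem dem [] hi hilen]

-- Indexing a row comprehension over range(n).
lemma pvGet1_map_pyRange (g : Int → Int) (n j : Int) (hj : 0 ≤ j) (hj2 : j < n) :
    pvGet1 ((PySem.List.pyRange 0 n 1).map g) j = g j := by
  unfold pvGet1
  exact PySem.List.pyGetD_map_pyRange_of_nonneg g n j 0 hj hj2

-- Indexing an outer comprehension over range(n) (rows are lists).
lemma pvGet2_map_pyRange (f : Int → List Int) (n i j : Int) (hi : 0 ≤ i) (hi2 : i < n) :
    pvGet2 ((PySem.List.pyRange 0 n 1).map f) i j = pvGet1 (f i) j := by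
  unfold pvGet2 pvGet1
  rw [PySem.List.pyGetD_map_pyRange_of_nonneg f n i [] hi hi2]

-- Indexing a map over a concrete list of rows.
lemma pvGet2_map_getElem (f : List Int → List Int) (l : List (List Int)) (i j : Int)
    (hi : 0 ≤ i) (h2 : i < (l.length : Int)) :
    pvGet2 (l.map f) i j = pvGet1 (f (l[i.toNat]'(by omega))) j := by
  unfold pvGet2 pvGet1
  rw [PySem.List.pyGetD_eq_getElem (l.map f) [] hi (by simpa using h2)]
  simp

-- Lookup in the horizontal table H.
lemma hH_lookup (dem : List (List Int)) (rows cols : Int)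
    (hlen : rows ≤ (dem.length : Int)) (i j : Int)
    (hi : 0 ≤ i) (hi2 : i < rows) (hj : 0 ≤ j) (hj2 : j < cols - 1) :
    pvGet2 ((PySem.List.slice dem none (some rows)).map (fun r =>
      (PySem.List.pyRange 0 (cols - 1) 1).map (fun j => |pvGet1 r (j + 1) - pvGet1 r j|))) i j
    = |pvGet2 dem i (j + 1) - pvGet2 dem i j| := by
  have hrows0 : (0:Int) ≤ rows := by omega
  have hidem : i < (dem.length : Int) := by omega
  rw [PySem.List.slice_to dem hrows0]
  have htlen : i < ((dem.take rows.toNat).length : Int) := by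
    simp [List.length_take]; omega
  rw [pvGet2_map_getElem _ _ i j hi htlen]
  have hget : (dem.take rows.toNat)[i.toNat]'(by omega) = dem[i.toNat]'(by omega) := by
    simp [List.getElem_take]
  rw [hget]
  rw [pvGet1_map_pyRange _ (cols - 1) j hj hj2]
  rw [pvGet2_row dem i hi hidem (j+1), pvGet2_row dem i hi hidem j]

-- Lookup in the vertical table V.
lemma hV_lookup (dem : List (List Int)) (rows cols : Int) (i j : Int)
    (hi : 0 ≤ i) (hi2 : i < rows - 1) (hj : 0 ≤ j) (hj2 : j < cols) :
    pvGet2 ((PySem.List.pyRange 0 (rows - 1) 1).map (fun i =>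
      (PySem.List.pyRange 0 cols 1).map (fun j => |pvGet2 dem (i + 1) j - pvGet2 dem i j|))) i j
    = |pvGet2 dem (i + 1) j - pvGet2 dem i j| := by
  rw [pvGet2_map_pyRange _ (rows - 1) i j hi hi2]
  exact pvGet1_map_pyRange _ cols j hj hj2

-- ===== VERDICT (by name: the statement is the Claim_ definition above) =====
theorem find_differnces_in_neightboring_nodes_spec : Claim_equal_find_differnces_in_neightboring_nodes := by
  intro dem rows cols _ hpre
  unfold Spec_find_differnces_in_neightboring_nodes
  unfold find_differnces_in_neightboring_nodes find_differnces_in_neightboring_nodes_alt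
  by_cases hr : rows ≤ 1
  · simp [hr, PySem.List.pyRange_one_eq_nil (by omega : rows - 1 ≤ 0)]
  · by_cases hc : cols ≤ 1
    · simp only [hr, hc, if_false, if_true]
      rw [PySem.List.foldl_append_singleton_eq_map]
      simp [PySem.List.pyRange_one_eq_nil (by omega : cols - 1 ≤ 0)]
    · rcases hpre with h | h | ⟨hlen, hall⟩
      · omega
      · omega
      simp only [hr, hc, if_false]
      rw [PySem.List.foldl_append_singleton_eq_map]
      simp only [List.nil_append]
      apply List.map_congr_left
      intro i hi
      rw [PySem.List.mem_pyRange_one] at hi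
      rw [PySem.List.foldl_append_singleton_eq_map]
      simp only [List.nil_append]
      apply List.map_congr_left
      intro j hj
      rw [PySem.List.mem_pyRange_one] at hj
      rw [hH_lookup dem rows cols hlen i j hi.1 (by omega) hj.1 hj.2,
          hH_lookup dem rows cols hlen (i + 1) j (by omega) (by omega) hj.1 hj.2,
          hV_lookup dem rows cols i j hi.1 hi.2 hj.1 (by omega),
          hV_lookup dem rows cols i (j + 1) hi.1 hi.2 (by omega) (by omega)]
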